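-- pv_equiv track=rewrite | github.com/nitindermohan/multifaceted-starlink-performance | gaming/compute_delay.py | compute_blocks
-- ===== SOURCE A (Python) =====
-- def compute_blocks(ls):
--     blocks = []
--     block_start = None
--     prev = None
--     ls = sorted([int(v) for v in ls])
--     for cur in sorted(ls):
--         if block_start is None:
--             block_start = cur
--         if prev is not None:
--             if prev + 1 != cur:
--                 blocks.append((block_start, prev))
--                 block_start = cur
--         prev = cur
--     return blocks
-- ===== SOURCE B (Python) =====
-- def compute_blocks(ls):
--     xs = sorted(int(v) for v in ls)
--     if not xs:
--         return []
--     # breaks: adjacent pairs (a, b) where b does not continue a's run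
--     breaks = [(a, b) for a, b in zip(xs, xs[1:]) if b != a + 1]
--     ends = [a for a, b in breaks]
--     starts = [xs[0]] + [b for a, b in breaks]
--     # starts has one more element than ends, so zip drops the final
--     # (never-emitted) block, exactly as the original does
--     return list(zip(starts, ends))
-- ===== Notes on version B (the rewrite author's own statement) =====
-- stated objective: alternative
-- what changed: Replaces the stateful loop carrying block_start/prev with a declarative pipeline: collect the adjacent pairs where a run breaks, read run ends and run starts off those break pairs, and zip them (zip's truncation reproduces the original's never-emitting the final block).
import Mathlib
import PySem

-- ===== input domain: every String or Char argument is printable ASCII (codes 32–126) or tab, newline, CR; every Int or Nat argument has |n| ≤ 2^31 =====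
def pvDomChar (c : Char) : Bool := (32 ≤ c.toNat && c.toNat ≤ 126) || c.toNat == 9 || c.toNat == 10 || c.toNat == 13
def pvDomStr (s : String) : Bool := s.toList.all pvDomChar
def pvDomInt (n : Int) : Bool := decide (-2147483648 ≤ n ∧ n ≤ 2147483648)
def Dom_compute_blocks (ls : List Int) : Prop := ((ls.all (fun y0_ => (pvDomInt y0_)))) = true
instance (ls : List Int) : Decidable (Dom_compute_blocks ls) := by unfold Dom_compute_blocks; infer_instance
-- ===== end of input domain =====

-- B replaces A's stateful loop (block_start/prev accumulators) with a declarative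
-- pipeline over adjacent pairs of the sorted list; same cost, alternative structure.

-- ===== PORT A =====
-- one step of A's for-loop; state = (blocks, block_start, prev)
def cbStep (s : List (Int × Int) × Option Int × Option Int) (cur : Int) :
    List (Int × Int) × Option Int × Option Int :=
  let blocks := s.1
  let block_start := s.2.1
  let prev := s.2.2
  let block_start := if block_start.isNone then some cur else block_start
  let bs : List (Int × Int) × Option Int :=
    match prev with
    | some p =>
        if p + 1 ≠ cur then (blocks ++ [(block_start.getD 0, p)], some cur)
        else (blocks, block_start)
    | none => (blocks, block_start)
  (bs.1, bs.2, some cur)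

def compute_blocks (ls : List Int) : List (Int × Int) :=
  let ls2 := PySem.List.sorted (ls.map (fun v => v)) (fun x => x) false
  ((PySem.List.sorted ls2 (fun x => x) false).foldl cbStep ([], none, none)).1

-- ===== PORT B =====
def compute_blocks_alt (ls : List Int) : List (Int × Int) :=
  let xs := PySem.List.sorted (ls.map (fun v => v)) (fun x => x) false
  match xs with
  | [] => []
  | x0 :: _ =>
    let breaks := (xs.zip (PySem.List.slice xs (some 1) none)).filter (fun p => p.2 != p.1 + 1)
    let ends := breaks.map (fun p => p.1)
    let starts := x0 :: breaks.map (fun p => p.2)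
    starts.zip ends

-- ===== PRECONDITION & SPEC =====
def Spec_compute_blocks (ls : List Int) (out : List (Int × Int)) : Prop := out = compute_blocks_alt ls
instance (ls : List Int) (out : List (Int × Int)) : Decidable (Spec_compute_blocks ls out) := by unfold Spec_compute_blocks; infer_instance

-- ===== CLAIM (what is proved, stated in full; the proofs are below) =====
def Claim_equal_compute_blocks : Prop := ∀ (ls : List Int), Dom_compute_blocks ls → Spec_compute_blocks ls (compute_blocks ls)

-- ===== LEMMAS AND PROOFS =====

-- the break pairs of a list: adjacent pairs (a,b) with b ≠ a+1
def pvBreaks (l : List Int) : List (Int × Int) :=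
  (l.zip l.tail).filter (fun p => p.2 != p.1 + 1)

theorem pvBreaks_cons (p c : Int) (ys : List Int) :
    pvBreaks (p :: c :: ys)
      = (if c = p + 1 then [] else [(p, c)]) ++ pvBreaks (c :: ys) := by
  simp only [pvBreaks, List.tail_cons, List.zip_cons_cons, List.filter_cons]
  by_cases h : c = p + 1 <;> simp [h]

-- invariant of A's loop: starting from a running block (start b, previous p),
-- the fold appends exactly the zipped starts/ends of the breaks of p :: ys
theorem cb_fold_inv (ys : List Int) (blocks : List (Int × Int)) (b p : Int) :
    (ys.foldl cbStep (blocks, some b, some p)).1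
      = blocks ++ (b :: (pvBreaks (p :: ys)).map (fun q => q.2)).zip
                   ((pvBreaks (p :: ys)).map (fun q => q.1)) := by
  induction ys generalizing blocks b p with
  | nil => simp [pvBreaks]
  | cons c ys ih =>
    rw [List.foldl_cons, pvBreaks_cons]
    by_cases h : c = p + 1
    · have hstep : cbStep (blocks, some b, some p) c = (blocks, some b, some c) := by
        simp [cbStep, h]
      rw [hstep, ih]
      simp [h]
    · have hstep : cbStep (blocks, some b, some p) c
          = (blocks ++ [(b, p)], some c, some c) := by
        have h' : p + 1 ≠ c := fun he => h he.symm
        simp [cbStep, h']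
      rw [hstep, ih]
      simp [h]

-- ===== VERDICT (by name: the statement is the Claim_ definition above) =====
theorem compute_blocks_spec : Claim_equal_compute_blocks := by
  intro ls _
  show compute_blocks ls = compute_blocks_alt ls
  unfold compute_blocks compute_blocks_alt
  simp only [PySem.List.sorted_sorted]
  cases hys : PySem.List.sorted (ls.map (fun v => v)) (fun x => x) false with
  | nil => simp
  | cons x0 rest =>
    simp only
    have h0 : cbStep ([], none, none) x0 = ([], some x0, some x0) := by
      simp [cbStep]
    rw [List.foldl_cons, h0, cb_fold_inv]
    rw [PySem.List.slice_from_one]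
    simp [pvBreaks]
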